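-- pv_equiv track=rewrite | github.com/Tensorleap-hub/NVIDIA-Isaac-Sim | palletjack_sdg/experiments/generate_configs.py | collect_textures
-- ===== SOURCE A (Python) =====
-- TEXTURE_PREFIX = "/Isaac/Materials/Textures/Patterns/"
--
-- TEXTURE_KEYS = [f"metadata.synth_metadata_synth_texture_{i}" for i in range(1, 13)]
--
-- def collect_textures(row):
--     seen, textures = set(), []
--     for key in TEXTURE_KEYS:
--         val = row.get(key, "").strip()
--         if val and val not in seen:
--             seen.add(val)
--             textures.append(TEXTURE_PREFIX + val)
--     return textures
-- ===== SOURCE B (Python) =====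
-- TEXTURE_PREFIX = "/Isaac/Materials/Textures/Patterns/"
--
-- TEXTURE_KEYS = [f"metadata.synth_metadata_synth_texture_{i}" for i in range(1, 13)]
--
-- def collect_textures(row):
--     vals = [v for k in TEXTURE_KEYS if (v := row.get(k, "").strip())]
--     def uniq(vs):
--         if not vs:
--             return []
--         head = vs[0]
--         return [TEXTURE_PREFIX + head] + uniq([v for v in vs[1:] if v != head])
--     return uniq(vals)
-- ===== Notes on version B (the rewrite author's own statement) =====
-- stated objective: alternative
-- what changed: Replaces the single seen-set accumulator loop with two stages: a comprehension collecting the non-empty stripped values, then a recursive quicksort-style dedup that takes the head, filters all later copies of it out of the tail, and recurses - no seen set or dict is maintained.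
import Mathlib
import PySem

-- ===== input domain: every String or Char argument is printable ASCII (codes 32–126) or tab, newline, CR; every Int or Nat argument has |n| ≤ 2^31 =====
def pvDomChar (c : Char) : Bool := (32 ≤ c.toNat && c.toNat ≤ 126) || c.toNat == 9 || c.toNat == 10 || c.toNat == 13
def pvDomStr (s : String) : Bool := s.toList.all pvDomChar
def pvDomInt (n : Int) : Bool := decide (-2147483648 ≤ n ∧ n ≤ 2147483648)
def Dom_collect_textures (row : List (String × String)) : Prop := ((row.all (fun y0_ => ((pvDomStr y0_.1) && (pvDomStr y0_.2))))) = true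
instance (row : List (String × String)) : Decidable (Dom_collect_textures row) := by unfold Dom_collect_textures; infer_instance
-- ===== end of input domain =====

-- B replaces A's single seen-set accumulator loop with a staged pipeline: collect the
-- non-empty stripped values, then dedup by recursively filtering the head's later copies
-- out of the tail (no seen set); objective: alternative, same cost on the 12 fixed keys.

def TEXTURE_PREFIX : String := "/Isaac/Materials/Textures/Patterns/"

def TEXTURE_KEYS : List String :=
  (PySem.List.pyRange 1 13 1).map (fun i => "metadata.synth_metadata_synth_texture_" ++ PySem.Int.toStr i)

-- ===== PORT A =====
def collect_textures (row : List (String × String)) : List String :=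
  (TEXTURE_KEYS.foldl (fun (st : PySem.Set String × List String) key =>
      let val := PySem.Str.strip ((PySem.Dict.mk row).getD key "")
      if val ≠ "" ∧ val ∉ st.1 then
        (PySem.Set.add st.1 val, st.2 ++ [TEXTURE_PREFIX ++ val])
      else st)
    (PySem.Set.empty, [])).2

-- ===== PORT B =====
-- B's inner helper `uniq`: head, filter its copies out of the tail, recurse.
def pvUniq : List String → List String
  | [] => []
  | head :: rest => (TEXTURE_PREFIX ++ head) :: pvUniq (rest.filter (fun v => v != head))
termination_by vs => vs.length
decreasing_by
  simpa using Nat.lt_succ_of_le (List.length_filter_le _ _)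

def collect_textures_alt (row : List (String × String)) : List String :=
  let vals := TEXTURE_KEYS.filterMap (fun k =>
    let v := PySem.Str.strip ((PySem.Dict.mk row).getD k "")
    if v = "" then none else some v)
  pvUniq vals

-- ===== PRECONDITION & SPEC =====
def Spec_collect_textures (row : List (String × String)) (out : List String) : Prop := out = collect_textures_alt row
instance (row : List (String × String)) (out : List String) : Decidable (Spec_collect_textures row out) := by unfold Spec_collect_textures; infer_instance

-- ===== CLAIM (what is proved, stated in full; the proofs are below) =====
def Claim_equal_collect_textures : Prop := ∀ (row : List (String × String)), Dom_collect_textures row → Spec_collect_textures row (collect_textures row)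

-- ===== LEMMAS AND PROOFS =====

-- A's loop step, phrased on the already-computed stripped value.
def pvStep (st : PySem.Set String × List String) (v : String) : PySem.Set String × List String :=
  if v ≠ "" ∧ v ∉ st.1 then (PySem.Set.add st.1 v, st.2 ++ [TEXTURE_PREFIX ++ v]) else st

-- Folding A's step over the keys equals folding it over the filtered non-empty values.
theorem pv_fold_filter (g : String → String) :
    ∀ (ks : List String) (st : PySem.Set String × List String),
      ks.foldl (fun st k => pvStep st (g k)) st
        = (ks.filterMap (fun k => if g k = "" then none else some (g k))).foldl pvStep st := by
  intro ks
  induction ks with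
  | nil => intro st; rfl
  | cons k rest ih =>
    intro st
    rw [List.foldl_cons, List.filterMap_cons]
    by_cases h : g k = ""
    · rw [if_pos h, show pvStep st (g k) = st from by simp [pvStep, h], ih]
    · rw [if_neg h, ih, List.foldl_cons]

-- Invariant: A's loop over nonempty values, started with seen set s and output t,
-- appends exactly pvUniq of the values not yet in s.
theorem pv_loop_uniq (n : Nat) :
    ∀ (vs : List String), vs.length ≤ n → ∀ (s : PySem.Set String) (t : List String),
      (∀ v ∈ vs, v ≠ "") →
      (vs.foldl pvStep (s, t)).2 = t ++ pvUniq (vs.filter (fun v => !(PySem.Set.contains s v))) := by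
  induction n with
  | zero =>
    intro vs hlen s t _
    have : vs = [] := List.length_eq_zero_iff.mp (Nat.le_zero.mp hlen)
    subst this; simp [pvUniq]
  | succ n ih =>
    intro vs hlen s t hne
    match vs with
    | [] => simp [pvUniq]
    | v :: rest =>
      have hv : v ≠ "" := hne v (by simp)
      have hrest : ∀ w ∈ rest, w ≠ "" := fun w hw => hne w (List.mem_cons_of_mem v hw)
      have hlr : rest.length ≤ n := Nat.le_of_succ_le_succ hlen
      by_cases hmem : v ∈ s
      · have hstep : pvStep (s, t) v = (s, t) := by simp [pvStep, hmem]
        rw [List.foldl_cons, hstep, ih rest hlr s t hrest, List.filter_cons]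
        simp [hmem]
      · have hstep : pvStep (s, t) v = (s ++ [v], t ++ [TEXTURE_PREFIX ++ v]) := by
          simp [pvStep, hv, hmem]
        rw [List.foldl_cons, hstep,
          ih rest hlr (s ++ [v]) (t ++ [TEXTURE_PREFIX ++ v]) hrest]
        have hfilt : rest.filter (fun w => !(PySem.Set.contains (s ++ [v]) w))
            = (rest.filter (fun w => !(PySem.Set.contains s w))).filter (fun w => w != v) := by
          rw [List.filter_filter]
          refine List.filter_congr (fun w _ => ?_)
          by_cases hwv : w = v <;>
            simp [PySem.Set.contains, List.mem_append, hwv]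
        rw [hfilt, List.filter_cons]
        simp [hmem, pvUniq]

-- ===== VERDICT (by name: the statement is the Claim_ definition above) =====
theorem collect_textures_spec : Claim_equal_collect_textures := by
  intro row _
  unfold Spec_collect_textures
  show collect_textures row = collect_textures_alt row
  set g := fun k => PySem.Str.strip ((PySem.Dict.mk row).getD k "") with hg
  set vals := TEXTURE_KEYS.filterMap (fun k => if g k = "" then none else some (g k)) with hvals
  have hA : collect_textures row = (vals.foldl pvStep (PySem.Set.empty, [])).2 := by
    unfold collect_textures
    exact congrArg Prod.snd (pv_fold_filter g TEXTURE_KEYS (PySem.Set.empty, []))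
  have hne : ∀ v ∈ vals, v ≠ "" := by
    intro v hv
    rw [hvals, List.mem_filterMap] at hv
    obtain ⟨k, _, hk⟩ := hv
    by_cases h : g k = ""
    · rw [if_pos h] at hk; cases hk
    · rw [if_neg h] at hk; cases hk; exact h
  rw [hA, pv_loop_uniq vals.length vals (Nat.le_refl _) _ _ hne]
  have : vals.filter (fun v => !(PySem.Set.contains PySem.Set.empty v)) = vals := by
    refine List.filter_eq_self.mpr (fun w _ => ?_)
    simp [PySem.Set.contains, PySem.Set.empty]
  rw [this]
  rfl
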